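-- pv_equiv track=rewrite | github.com/jij3x/SolutionJudger | evaluate.py | binarytree_filter
-- ===== SOURCE A (Python) =====
-- def binarytree_filter(line):
--     tree = line[1:-1].split(",")
--     filtered = []
--     f = 0
--     for n in tree:
--         if n != "#":
--             if f == 1:
--                 filtered.append(n)
--             f ^= 1
--         else:
--             f = 0
--             filtered.append(n)
--
--     return "[{}]".format(",".join(filtered))
-- ===== SOURCE B (Python) =====
-- def binarytree_filter(line):
--     result = []
--     group = []
--     for n in line[1:-1].split(","):
--         if n == "#":
--             result.extend(x for i, x in enumerate(group) if i % 2 == 1)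
--             result.append("#")
--             group = []
--         else:
--             group.append(n)
--     result.extend(x for i, x in enumerate(group) if i % 2 == 1)
--     return "[{}]".format(",".join(result))
-- ===== Notes on version B (the rewrite author's own statement) =====
-- stated objective: alternative
-- what changed: Replaces the toggling parity-flag state machine with run grouping: consecutive non-separator tokens are collected into a group whose odd-indexed elements are flushed at each separator token and at the end.
import Mathlib
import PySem

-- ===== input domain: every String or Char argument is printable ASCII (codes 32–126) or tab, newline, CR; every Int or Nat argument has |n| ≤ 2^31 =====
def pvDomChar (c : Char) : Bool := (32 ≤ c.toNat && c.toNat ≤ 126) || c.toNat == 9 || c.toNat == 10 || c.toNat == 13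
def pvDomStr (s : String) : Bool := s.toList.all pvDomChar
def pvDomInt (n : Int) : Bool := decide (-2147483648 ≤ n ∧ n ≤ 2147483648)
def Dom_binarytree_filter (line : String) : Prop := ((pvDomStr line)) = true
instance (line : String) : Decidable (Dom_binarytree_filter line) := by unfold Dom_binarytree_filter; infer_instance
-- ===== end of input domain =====

-- B replaces A's toggling parity-flag state machine with run grouping plus odd-index selection (objective: alternative, same cost).

-- ===== PORT A =====
-- the for-loop of A: state (filtered, f), branches in A's order
def pvLoopA : List String → List String → Int → List String
  | [], filtered, _ => filtered
  | n :: rest, filtered, f =>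
    if n ≠ "#" then
      pvLoopA rest (if f == 1 then filtered ++ [n] else filtered) (PySem.Int.bxor f 1)
    else
      pvLoopA rest (filtered ++ ["#"]) 0

def binarytree_filter (line : String) : String :=
  let tree := (PySem.Str.split? (PySem.Str.slice line (some 1) (some (-1))) ",").getD []
  String.ofList ('[' :: (PySem.Str.join "," (pvLoopA tree [] 0)).toList ++ [']'])

-- ===== PORT B =====
-- [x for i, x in enumerate(group) if i % 2 == 1]
def pvOddIdx (group : List String) : List String :=
  ((PySem.List.enumerate group 0).filter (fun p => PySem.Int.mod p.1 2 == 1)).map (·.2)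

-- the for-loop of B: state (result, group); the trailing flush happens on []
def pvLoopB : List String → List String → List String → List String
  | [], result, group => result ++ pvOddIdx group
  | n :: rest, result, group =>
    if n == "#" then
      pvLoopB rest (result ++ pvOddIdx group ++ ["#"]) []
    else
      pvLoopB rest result (group ++ [n])

def binarytree_filter_alt (line : String) : String :=
  let tree := (PySem.Str.split? (PySem.Str.slice line (some 1) (some (-1))) ",").getD []
  String.ofList ('[' :: (PySem.Str.join "," (pvLoopB tree [] [])).toList ++ [']'])

-- ===== PRECONDITION & SPEC =====
def Spec_binarytree_filter (line : String) (out : String) : Prop := out = binarytree_filter_alt line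
instance (line : String) (out : String) : Decidable (Spec_binarytree_filter line out) := by unfold Spec_binarytree_filter; infer_instance

-- ===== CLAIM (what is proved, stated in full; the proofs are below) =====
def Claim_equal_binarytree_filter : Prop := ∀ (line : String), Dom_binarytree_filter line → Spec_binarytree_filter line (binarytree_filter line)

-- ===== LEMMAS AND PROOFS =====

lemma pvOddIdx_nil : pvOddIdx [] = [] := rfl

lemma pvOddIdx_append_singleton (g : List String) (n : String) :
    pvOddIdx (g ++ [n]) = pvOddIdx g ++ (if g.length % 2 = 1 then [n] else []) := by
  unfold pvOddIdx
  rw [PySem.List.enumerate_append]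
  simp only [List.filter_append, List.map_append]
  congr 1
  have hm : ((g.length : Int) % 2) = ((g.length % 2 : Nat) : Int) := by push_cast; ring
  rcases Nat.mod_two_eq_zero_or_one g.length with h | h <;>
    simp [PySem.List.enumerate, List.filter, hm, h]

lemma pvLoop_agree (tokens : List String) :
    ∀ (result group : List String),
      pvLoopA tokens (result ++ pvOddIdx group) ((group.length % 2 : Nat) : Int) =
        pvLoopB tokens result group := by
  induction tokens with
  | nil => intro result group; simp [pvLoopA, pvLoopB]
  | cons n rest ih =>
    intro result group
    by_cases hn : n = "#"
    · subst hn
      simp only [pvLoopA, pvLoopB, ne_eq, not_true_eq_false, if_false, beq_self_eq_true]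
      have := ih (result ++ pvOddIdx group ++ ["#"]) []
      simpa [pvOddIdx_nil] using this
    · simp only [pvLoopA, pvLoopB, ne_eq, hn, not_false_eq_true, if_true, beq_iff_eq]
      have := ih result (group ++ [n])
      rw [pvOddIdx_append_singleton] at this
      rcases Nat.mod_two_eq_zero_or_one group.length with h | h
      · have hlen : (group ++ [n]).length % 2 = 1 := by simp [List.length_append]; omega
        rw [hlen] at this
        simpa [h, PySem.Int.bxor] using this
      · have hlen : (group ++ [n]).length % 2 = 0 := by simp [List.length_append]; omega
        rw [hlen] at this
        simpa [h, PySem.Int.bxor] using this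

-- ===== VERDICT (by name: the statement is the Claim_ definition above) =====
theorem binarytree_filter_spec : Claim_equal_binarytree_filter := by
  intro line _
  unfold Spec_binarytree_filter binarytree_filter binarytree_filter_alt
  have := pvLoop_agree ((PySem.Str.split? (PySem.Str.slice line (some 1) (some (-1))) ",").getD []) [] []
  simp only [pvOddIdx_nil, List.append_nil, List.length_nil, Nat.zero_mod, Nat.cast_zero] at this
  exact congrArg (fun r => String.ofList ('[' :: (PySem.Str.join "," r).toList ++ [']'])) this
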